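-- pv_equiv track=rewrite | github.com/bert-bae/project-euler | questions/id_5.py | findDivisibleTarget
-- ===== SOURCE A (Python) =====
-- def isDivisibleBy(num, division):
--   return True if num % division == 0 else False
--
-- def findDivisibleTarget(arrMatch):
--   maxNum = max(arrMatch)
--   current = maxNum * 2
--   state = False
--   while state == False:
--     result = True
--     for i in arrMatch:
--       if isDivisibleBy(current, i) is False:
--         current += maxNum
--         result = False
--         break
--     if result == True:
--       state = True
--   return current
-- ===== SOURCE B (Python) =====
-- def findDivisibleTarget(arrMatch):
--   def gcd(a, b):
--     while b:
--       a, b = b, a % b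
--     return a
--   maxNum = max(arrMatch)
--   lcm = 1
--   for x in arrMatch:
--     ax = abs(x)
--     lcm = lcm // gcd(lcm, ax) * ax
--   k = lcm // abs(maxNum)
--   if k < 2:
--     k = 2
--   return k * maxNum
-- ===== Notes on version B (the rewrite author's own statement) =====
-- stated objective: faster
-- what changed: Replaced A's unbounded trial loop (step by maxNum, re-test every element each round) with a closed form: the lcm of the absolute values via a hand-written Euclid gcd, divided by |max|, bumped to at least 2, times max. Intended as faster (asymptotic); measured: A timed out already at n=16 where B returned, so no ratio could be read at a common size.
-- outside the precondition, e.g. on findDivisibleTarget([]): A raises ValueError, B raises ValueError; on findDivisibleTarget([0, 3]): A raises ZeroDivisionError, B returns 6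
import Mathlib
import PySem

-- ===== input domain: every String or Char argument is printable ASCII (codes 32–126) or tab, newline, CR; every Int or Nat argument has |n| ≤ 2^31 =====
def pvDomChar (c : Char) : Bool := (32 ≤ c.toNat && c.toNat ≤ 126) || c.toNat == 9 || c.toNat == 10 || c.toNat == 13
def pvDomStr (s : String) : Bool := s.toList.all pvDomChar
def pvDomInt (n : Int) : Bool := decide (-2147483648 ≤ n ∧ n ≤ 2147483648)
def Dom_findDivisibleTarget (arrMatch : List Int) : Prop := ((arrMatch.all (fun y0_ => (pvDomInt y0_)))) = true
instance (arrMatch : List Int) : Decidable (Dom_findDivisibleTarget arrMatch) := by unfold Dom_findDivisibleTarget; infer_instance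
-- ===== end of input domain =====

-- B replaces A's unbounded trial loop (step maxNum, test every element each round) by a
-- closed-form answer: the lcm of the absolute values, divided by |max|, bumped up to at least 2,
-- times max.  Objective: faster; intended asymptotic speed-up (a timing run saw A time
-- out at n=16 where B returned, so no ratio could be measured at a common size).

-- ===== PORT A =====
-- Python's while loop, transliterated: the for-loop with break is the first-failure test
-- (`List.all` of `current % i == 0`); on failure current += maxNum and the while loop restarts.
-- The fuel argument only makes the recursion total; Pre_ guarantees it never runs out
-- (the answer is at most the product of the |elements| times maxNum).
def pvLoopA (arrMatch : List Int) (maxNum : Int) : Nat → Int → Int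
  | 0, current => current
  | fuel + 1, current =>
      if arrMatch.all (fun i => PySem.Int.mod current i == 0) then current
      else pvLoopA arrMatch maxNum fuel (current + maxNum)

def pvFuelA (arrMatch : List Int) : Nat :=
  arrMatch.foldl (fun p x => p * x.natAbs) 1 + 2

def findDivisibleTarget (arrMatch : List Int) : Int :=
  match PySem.List.max? arrMatch (fun x => x) with
  | none => 0   -- max([]) raises ValueError; excluded by Pre_
  | some maxNum => pvLoopA arrMatch maxNum (pvFuelA arrMatch) (maxNum * 2)

-- ===== PORT B =====
-- Source B's hand-written Euclid gcd (on the nonnegative ints it is called with)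
def pvGcd : Nat → Nat → Nat
  | a, 0 => a
  | a, b + 1 => pvGcd (b + 1) (a % (b + 1))
  termination_by _a b => b
  decreasing_by exact Nat.mod_lt _ (Nat.succ_pos _)

def findDivisibleTarget_alt (arrMatch : List Int) : Int :=
  match PySem.List.max? arrMatch (fun x => x) with
  | none => 0   -- max([]) raises; excluded by Pre_
  | some maxNum =>
      let lcm := arrMatch.foldl (fun l x => l / pvGcd l x.natAbs * x.natAbs) 1
      let k : Int := ((lcm / maxNum.natAbs : Nat) : Int)
      let k := if k < 2 then 2 else k
      k * maxNum

-- ===== PRECONDITION & SPEC =====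
-- Pre_ excludes exactly the inputs where Python A raises: the empty list (max([]) raises
-- ValueError) and lists containing 0 (the loop eventually evaluates current % 0,
-- ZeroDivisionError).
def Pre_findDivisibleTarget (arrMatch : List Int) : Prop :=
  arrMatch ≠ [] ∧ (0 : Int) ∉ arrMatch
instance (arrMatch : List Int) : Decidable (Pre_findDivisibleTarget arrMatch) := by
  unfold Pre_findDivisibleTarget; infer_instance

def pvWitness_findDivisibleTarget : List Int := [3, 4, 6]

def Spec_findDivisibleTarget (arrMatch : List Int) (out : Int) : Prop := out = findDivisibleTarget_alt arrMatch
instance (arrMatch : List Int) (out : Int) : Decidable (Spec_findDivisibleTarget arrMatch out) := by unfold Spec_findDivisibleTarget; infer_instance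

-- ===== CLAIM (what is proved, stated in full; the proofs are below) =====
def Claim_equal_findDivisibleTarget : Prop := ∀ (arrMatch : List Int), Dom_findDivisibleTarget arrMatch → Pre_findDivisibleTarget arrMatch → Spec_findDivisibleTarget arrMatch (findDivisibleTarget arrMatch)

-- ===== LEMMAS AND PROOFS =====

theorem pvGcd_eq : ∀ (b a : Nat), pvGcd a b = Nat.gcd a b := by
  intro b
  induction b using Nat.strong_induction_on with
  | _ b ih =>
    intro a
    match b with
    | 0 => simp [pvGcd]
    | c + 1 =>
      rw [pvGcd, ih (a % (c + 1)) (Nat.mod_lt _ (Nat.succ_pos _))]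
      conv_rhs => rw [Nat.gcd_comm, Nat.gcd_rec, Nat.gcd_comm]

theorem lcm_step (l a : Nat) : l / Nat.gcd l a * a = Nat.lcm l a := by
  rw [Nat.lcm, Nat.mul_comm l a, Nat.mul_div_assoc a (Nat.gcd_dvd_left l a),
    Nat.mul_comm]

theorem fold_lcm_eq (arr : List Int) : ∀ acc : Nat,
    arr.foldl (fun l x => l / pvGcd l x.natAbs * x.natAbs) acc
      = arr.foldl (fun l x => Nat.lcm l x.natAbs) acc := by
  induction arr with
  | nil => intro acc; rfl
  | cons a t ih => intro acc; simp [List.foldl_cons, pvGcd_eq, lcm_step]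

theorem acc_dvd_fold_lcm (arr : List Int) : ∀ acc : Nat,
    acc ∣ arr.foldl (fun l x => Nat.lcm l x.natAbs) acc := by
  induction arr with
  | nil => intro acc; exact dvd_refl _
  | cons a t ih =>
    intro acc
    exact dvd_trans (Nat.dvd_lcm_left _ _) (ih _)

theorem mem_dvd_fold_lcm (arr : List Int) : ∀ (acc : Nat) (x : Int), x ∈ arr →
    x.natAbs ∣ arr.foldl (fun l x => Nat.lcm l x.natAbs) acc := by
  induction arr with
  | nil => intro _ _ hx; cases hx
  | cons a t ih =>
    intro acc x hx
    rcases List.mem_cons.mp hx with rfl | hx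
    · exact dvd_trans (Nat.dvd_lcm_right _ _) (acc_dvd_fold_lcm t _)
    · exact ih _ _ hx

theorem fold_lcm_dvd (arr : List Int) : ∀ (acc k : Nat), acc ∣ k →
    (∀ x ∈ arr, x.natAbs ∣ k) → arr.foldl (fun l x => Nat.lcm l x.natAbs) acc ∣ k := by
  induction arr with
  | nil => intro _ _ h _; exact h
  | cons a t ih =>
    intro acc k hacc hall
    exact ih _ _ (Nat.lcm_dvd hacc (hall a List.mem_cons_self))
      (fun x hx => hall x (List.mem_cons_of_mem _ hx))

theorem acc_dvd_fold_mul (arr : List Int) : ∀ acc : Nat,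
    acc ∣ arr.foldl (fun p x => p * x.natAbs) acc := by
  induction arr with
  | nil => intro acc; exact dvd_refl _
  | cons a t ih =>
    intro acc
    exact dvd_trans (dvd_mul_right acc a.natAbs) (ih _)

theorem mem_dvd_fold_mul (arr : List Int) : ∀ (acc : Nat) (x : Int), x ∈ arr →
    x.natAbs ∣ arr.foldl (fun p x => p * x.natAbs) acc := by
  induction arr with
  | nil => intro _ _ hx; cases hx
  | cons a t ih =>
    intro acc x hx
    rcases List.mem_cons.mp hx with rfl | hx
    · exact dvd_trans (dvd_mul_left x.natAbs acc) (acc_dvd_fold_mul t _)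
    · exact ih _ _ hx

theorem fold_mul_ne_zero (arr : List Int) : ∀ acc : Nat, (0 : Int) ∉ arr → acc ≠ 0 →
    arr.foldl (fun p x => p * x.natAbs) acc ≠ 0 := by
  induction arr with
  | nil => intro acc _ h; exact h
  | cons a t ih =>
    intro acc h0 hacc
    have ha : a.natAbs ≠ 0 :=
      Int.natAbs_ne_zero.mpr (fun h => h0 (h ▸ List.mem_cons_self))
    exact ih _ (fun hx => h0 (List.mem_cons_of_mem _ hx)) (Nat.mul_ne_zero hacc ha)

theorem pvLoopA_eq (arr : List Int) (maxNum : Int) (d kstar : Nat)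
    (hbridge : ∀ k : Nat,
      (arr.all (fun i => PySem.Int.mod ((k : Int) * maxNum) i == 0)) = true ↔ d ∣ k)
    (hk2 : 2 ≤ kstar) (hdk : d ∣ kstar)
    (hmin : ∀ k : Nat, 2 ≤ k → k < kstar → ¬ d ∣ k) :
    ∀ (fuel k : Nat), 2 ≤ k → k ≤ kstar → kstar ≤ k + fuel →
      pvLoopA arr maxNum fuel ((k : Int) * maxNum) = (kstar : Int) * maxNum := by
  intro fuel
  induction fuel with
  | zero =>
    intro k h2 hle hge
    have hk : k = kstar := by omega
    subst hk
    rfl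
  | succ fuel ih =>
    intro k h2 hle hge
    rw [pvLoopA]
    by_cases hc : d ∣ k
    · rw [if_pos ((hbridge k).mpr hc)]
      have hk : k = kstar := by
        by_contra hne
        exact hmin k h2 (lt_of_le_of_ne hle hne) hc
      rw [hk]
    · rw [if_neg (fun h => hc ((hbridge k).mp h))]
      have hstep : ((k : Int) * maxNum + maxNum) = ((k + 1 : Nat) : Int) * maxNum := by
        push_cast; ring
      rw [hstep]
      have hkne : k ≠ kstar := fun h => hc (h ▸ hdk)
      exact ih (k + 1) (by omega) (by omega) (by omega)

theorem findDivisibleTarget_spec : Claim_equal_findDivisibleTarget := by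
  intro arr _hDom hPre
  obtain ⟨hne, h0⟩ := hPre
  unfold Spec_findDivisibleTarget findDivisibleTarget findDivisibleTarget_alt
  rcases hmax : PySem.List.max? arr (fun x => x) with _ | maxNum
  · exact absurd (Iff.mp (PySem.List.max?_eq_none_iff arr (fun x => x)) hmax) hne
  have hmem : maxNum ∈ arr := PySem.List.max?_mem hmax
  have hmax0 : maxNum ≠ 0 := fun h => h0 (h ▸ hmem)
  set m : Nat := maxNum.natAbs with hm_def
  have hm : m ≠ 0 := Int.natAbs_ne_zero.mpr hmax0
  set L : Nat := arr.foldl (fun l x => Nat.lcm l x.natAbs) 1 with hL_def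
  set P : Nat := arr.foldl (fun p x => p * x.natAbs) 1 with hP_def
  have hP0 : P ≠ 0 := fold_mul_ne_zero arr 1 h0 one_ne_zero
  have hLP : L ∣ P :=
    fold_lcm_dvd arr 1 P (one_dvd _) (fun x hx => mem_dvd_fold_mul arr 1 x hx)
  have hL0 : L ≠ 0 := fun h => hP0 (Nat.eq_zero_of_zero_dvd (h ▸ hLP))
  have hmL : m ∣ L := mem_dvd_fold_lcm arr 1 maxNum hmem
  set d : Nat := L / m with hd_def
  have hdL : d ≤ L := hd_def ▸ Nat.div_le_self L m
  have hLdm : d * m = L := Nat.div_mul_cancel hmL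
  clear_value d
  have hd0 : d ≠ 0 := fun h => hL0 (by rw [← hLdm, h, Nat.zero_mul])
  -- the divisibility characterisation
  have hchar : ∀ k : Nat, (∀ x ∈ arr, x ∣ ((k : Int) * maxNum)) ↔ d ∣ k := by
    intro k
    have h1 : ∀ x ∈ arr, (x ∣ ((k : Int) * maxNum) ↔ x.natAbs ∣ k * m) := by
      intro x _
      rw [← Int.natAbs_dvd_natAbs, Int.natAbs_mul, Int.natAbs_natCast]
    have h2 : (∀ x ∈ arr, x.natAbs ∣ k * m) ↔ L ∣ k * m := by
      constructor
      · intro h; exact fold_lcm_dvd arr 1 (k * m) (one_dvd _) h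
      · intro h x hx; exact dvd_trans (mem_dvd_fold_lcm arr 1 x hx) h
    have h3 : L ∣ k * m ↔ d ∣ k := by
      rw [← hLdm]
      exact Nat.mul_dvd_mul_iff_right (Nat.pos_of_ne_zero hm)
    rw [← h3, ← h2]
    exact forall₂_congr h1
  have hbridge : ∀ k : Nat,
      (arr.all (fun i => PySem.Int.mod ((k : Int) * maxNum) i == 0)) = true ↔ d ∣ k := by
    intro k
    rw [← hchar k]
    simp [List.all_eq_true, PySem.Int.mod_eq_zero_iff_dvd]
  set kstar : Nat := if d < 2 then 2 else d with hkstar_def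
  clear_value kstar
  have hk2 : 2 ≤ kstar := by rw [hkstar_def]; split_ifs <;> omega
  have hdk : d ∣ kstar := by
    rw [hkstar_def]
    split_ifs with h
    · have : d = 1 := by omega
      rw [this]; exact one_dvd _
    · exact dvd_refl d
  have hmin : ∀ k : Nat, 2 ≤ k → k < kstar → ¬ d ∣ k := by
    intro k h2 hlt hdvd
    rw [hkstar_def] at hlt
    split_ifs at hlt with h
    · omega
    · exact absurd (Nat.le_of_dvd (by omega) hdvd) (by omega)
  -- the A side: run the loop
  have hLleP : L ≤ P := Nat.le_of_dvd (Nat.pos_of_ne_zero hP0) hLP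
  have hA : pvLoopA arr maxNum (pvFuelA arr) (maxNum * 2) = (kstar : Int) * maxNum := by
    have h2 : maxNum * 2 = ((2 : Nat) : Int) * maxNum := by push_cast; ring
    rw [h2]
    have hfuel : pvFuelA arr = P + 2 := by rw [pvFuelA, hP_def]
    rw [hfuel]
    have hkP : kstar ≤ 2 + (P + 2) := by
      rcases Nat.lt_or_ge d 2 with h | h
      · rw [hkstar_def, if_pos h]; omega
      · rw [hkstar_def, if_neg (by omega)]; omega
    exact pvLoopA_eq arr maxNum d kstar hbridge hk2 hdk hmin (P + 2) 2 le_rfl hk2 hkP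
  -- the B side: the closed form
  have hB : (let lcm := arr.foldl (fun l x => l / pvGcd l x.natAbs * x.natAbs) 1
      let k : Int := ((lcm / maxNum.natAbs : Nat) : Int)
      let k := if k < 2 then 2 else k
      k * maxNum) = (kstar : Int) * maxNum := by
    simp only [fold_lcm_eq arr 1, ← hL_def, ← hm_def, ← hd_def]
    have : ((d : Int) < 2) ↔ d < 2 := by exact_mod_cast Nat.cast_lt (α := Int)
    rw [hkstar_def]
    split_ifs with h1 h2 h2 <;> push_cast <;> first | rfl | omega
  simp only []
  rw [hA, hB]
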